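-- pv_equiv track=rewrite | github.com/shyngysk/css | p10.py | c
-- ===== SOURCE A (Python) =====
-- def c(nums):
--     count = [0] * 9
--     i = 0
--     while i < len(nums):
--         x = nums[i]
--         if x == 0:
--             break
--         count[x-1] += 1
--         i += 1
--     return count
-- ===== SOURCE B (Python) =====
-- def c(nums):
--     # B: locate the stopping boundary first, then count the prefix in a second pass.
--     try:
--         end = nums.index(0)
--     except ValueError:
--         end = len(nums)
--     count = [0] * 9
--     for x in nums[:end]:
--         count[x - 1] += 1
--     return count
-- ===== Notes on version B (the rewrite author's own statement) =====
-- stated objective: alternative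
-- what changed: B first finds the stopping boundary with nums.index(0) (falling back to len(nums)) and then counts the prefix slice in a separate plain for-loop, instead of A's fused while-loop with manual index and break.
import Mathlib
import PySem

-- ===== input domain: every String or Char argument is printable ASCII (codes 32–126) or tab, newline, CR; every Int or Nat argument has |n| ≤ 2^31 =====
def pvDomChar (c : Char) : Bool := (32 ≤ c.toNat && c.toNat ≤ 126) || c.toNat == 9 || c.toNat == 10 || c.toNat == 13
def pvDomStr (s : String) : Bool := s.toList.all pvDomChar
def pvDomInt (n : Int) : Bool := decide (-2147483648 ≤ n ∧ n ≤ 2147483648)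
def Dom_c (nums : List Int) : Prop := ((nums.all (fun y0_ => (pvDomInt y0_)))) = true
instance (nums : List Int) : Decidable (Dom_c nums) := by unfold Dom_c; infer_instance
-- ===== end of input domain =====

-- B differs only in decomposition (boundary search + counting pass vs fused scan); return values agree on Pre_.

-- count[i] += 1 with Python index semantics: read with pyGetD, write with pySetD.
-- Exact whenever the index is in range (Raise.InRange); out-of-range indices raise IndexError
-- in Python and are excluded by Pre_c.
def pyIncAt (count : List Int) (i : Int) : List Int :=
  PySem.List.pySetD count i (PySem.List.pyGetD count i 0 + 1)

-- ===== PORT A =====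
-- A's while loop: walk the list, break on 0, increment count[x-1].
def cLoop (count : List Int) : List Int → List Int
  | [] => count
  | x :: rest => if x == 0 then count else cLoop (pyIncAt count (x - 1)) rest

def c (nums : List Int) : List Int :=
  cLoop [0, 0, 0, 0, 0, 0, 0, 0, 0] nums

-- ===== PORT B =====
-- B: end = nums.index(0) (or len(nums) on ValueError); then count over nums[:end].
def c_alt (nums : List Int) : List Int :=
  (PySem.List.slice nums none (some (((PySem.List.index? nums 0).getD nums.length : Nat) : Int))).foldl
    (fun count x => pyIncAt count (x - 1)) [0, 0, 0, 0, 0, 0, 0, 0, 0]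

-- ===== PRECONDITION & SPEC =====
-- Pre_c excludes exactly the inputs where A raises IndexError: an element x before the first 0
-- whose index x-1 falls outside the Python index range -9 .. 8 of the 9-element count list.
def Pre_c (nums : List Int) : Prop :=
  ∀ x ∈ nums.takeWhile (fun x => !(x == 0)), -8 ≤ x ∧ x ≤ 9

instance (nums : List Int) : Decidable (Pre_c nums) := by unfold Pre_c; infer_instance

def pvWitness_c : List Int := [3, 3, 9, -1, 0, 42]

def Spec_c (nums : List Int) (out : List Int) : Prop := out = c_alt nums
instance (nums : List Int) (out : List Int) : Decidable (Spec_c nums out) := by unfold Spec_c; infer_instance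

-- ===== CLAIM (what is proved, stated in full; the proofs are below) =====
def Claim_equal_c : Prop := ∀ (nums : List Int), Dom_c nums → Pre_c nums → Spec_c nums (c nums)

-- ===== LEMMAS AND PROOFS =====

-- B's prefix nums[:index of 0] is the takeWhile prefix.
theorem slice_index_eq_takeWhile (nums : List Int) :
    PySem.List.slice nums none (some (((PySem.List.index? nums 0).getD nums.length : Nat) : Int))
      = nums.takeWhile (fun x => !(x == 0)) := by
  rw [PySem.List.slice_to_natCast]
  induction nums with
  | nil => rfl
  | cons x rest ih =>
    by_cases hx : x = 0
    · subst hx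
      rw [PySem.List.index?_cons_self]
      simp [List.takeWhile]
    · rw [PySem.List.index?_cons_of_ne rest hx]
      cases h : PySem.List.index? rest 0 with
      | none =>
        rw [h] at ih
        simp only [Option.getD_none] at ih
        simp only [Option.map_none, Option.getD_none, List.length_cons, List.take_succ_cons,
          List.takeWhile_cons]
        simp [hx, ih]
      | some k =>
        rw [h] at ih
        simp only [Option.getD_some] at ih
        simp only [Option.map_some, Option.getD_some, List.take_succ_cons, List.takeWhile_cons]
        simp [hx, ih]

-- A's fused loop equals a fold over the takeWhile prefix.
theorem cLoop_eq_foldl (nums : List Int) : ∀ (count : List Int),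
    cLoop count nums = (nums.takeWhile (fun x => !(x == 0))).foldl (fun count x => pyIncAt count (x - 1)) count := by
  induction nums with
  | nil => intro count; rfl
  | cons x rest ih =>
    intro count
    by_cases hx : x = 0
    · subst hx; simp [cLoop, List.takeWhile]
    · simp [cLoop, hx, ih]

-- ===== VERDICT (by name: the statement is the Claim_ definition above) =====
theorem c_spec : Claim_equal_c := by
  intro nums _ _
  unfold Spec_c c c_alt
  rw [slice_index_eq_takeWhile, cLoop_eq_foldl]
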